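/- GENERATED by mk_final_copies.py from the proof of the farm's unit `swap_bytes` (farm:swap_bytes.1: Proof.lean) as the
   re-elaboration sweep compiled it — do not edit. -/
import Asan.CheckWalk
import Vorbis.Spec.Units.swap_bytes

open X86 X86.User Asan Vorbis

set_option maxRecDepth 4000
set_option maxHeartbeats 4000000

namespace Vorbis.Spec.swap_bytes

/-- **One round of the loop of `swap_bytes`, on memories** (libc.c:62-64). `M` is the memory at the loop head, where the first
`i` bytes of the records at `a` and `b` hold each other's entry contents (entry memory `M₀`) and the bytes from `i` on are
untouched; `M'` is `M` after the push of a check call's return address at `p` (on the stack, off both records) and the two byte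
stores of round `i`. Then the same holds of `M'` with `i + 1`. All the disjointness arithmetic of the back edge is done here,
in a small context. -/
theorem swap_step (M₀ M M' : Mem) (a b p : Word) (w i c : Nat)
    (hM' : M' = ((M.writeLE p 8 c).writeLE (a + UInt64.ofNat i) 1 (M₀.readLE (b + UInt64.ofNat i) 1)).writeLE
      (b + UInt64.ofNat i) 1 (M₀.readLE (a + UInt64.ofNat i) 1))
    (hilt : i < w)
    (ha : a.toNat + w < 2 ^ 64)
    (hb : b.toNat + w < 2 ^ 64)
    (hp : p.toNat + 8 < 2 ^ 64)
    (hab : a.toNat + w ≤ b.toNat ∨ b.toNat + w ≤ a.toNat)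
    (hpa : p.toNat + 8 ≤ a.toNat ∨ a.toNat + w ≤ p.toNat)
    (hpb : p.toNat + 8 ≤ b.toNat ∨ b.toNat + w ≤ p.toNat)
    (hdoneA : ∀ j, j < i → M.readLE (a + UInt64.ofNat j) 1 = M₀.readLE (b + UInt64.ofNat j) 1)
    (hdoneB : ∀ j, j < i → M.readLE (b + UInt64.ofNat j) 1 = M₀.readLE (a + UInt64.ofNat j) 1)
    (htodoA : ∀ j, i ≤ j → j < w → M.readLE (a + UInt64.ofNat j) 1 = M₀.readLE (a + UInt64.ofNat j) 1)
    (htodoB : ∀ j, i ≤ j → j < w → M.readLE (b + UInt64.ofNat j) 1 = M₀.readLE (b + UInt64.ofNat j) 1) :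
    (∀ j, j < i + 1 → M'.readLE (a + UInt64.ofNat j) 1 = M₀.readLE (b + UInt64.ofNat j) 1) ∧
    (∀ j, j < i + 1 → M'.readLE (b + UInt64.ofNat j) 1 = M₀.readLE (a + UInt64.ofNat j) 1) ∧
    (∀ j, i + 1 ≤ j → j < w → M'.readLE (a + UInt64.ofNat j) 1 = M₀.readLE (a + UInt64.ofNat j) 1) ∧
    (∀ j, i + 1 ≤ j → j < w → M'.readLE (b + UInt64.ofNat j) 1 = M₀.readLE (b + UInt64.ofNat j) 1) := by
  subst hM'
  refine ⟨?_, ?_, ?_, ?_⟩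
  · -- the bytes of `a` exchanged so far, and `a[i]`
    intro j hj
    by_cases hji : j = i
    · subst hji
      have hlt := X86.User.Mem.readLE_lt M₀ (b + UInt64.ofNat j) 1
      u_read
    · have h := hdoneA j (by omega)
      u_frame h
  · -- the bytes of `b` exchanged so far, and `b[i]`
    intro j hj
    by_cases hji : j = i
    · subst hji
      have hlt := X86.User.Mem.readLE_lt M₀ (a + UInt64.ofNat j) 1
      u_read
    · have h := hdoneB j (by omega)
      u_frame h
  · -- the bytes of `a` not yet reached
    intro j hj1 hj2
    have h := htodoA j (by omega) hj2
    u_frame h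
  · -- the bytes of `b` not yet reached
    intro j hj1 hj2
    have h := htodoB j (by omega) hj2
    u_frame h

end Vorbis.Spec.swap_bytes

/-- `swap_bytes(a, b, w)` satisfies its contract: six pushes and a spill of `b`, one loop (`u_loop` / `u_loop_back`, head
0x101252) whose body has two check calls (`a + i`, `b + i`: inside the two live records of the pre), two byte loads and two
UNCHECKED byte stores to the same two addresses (their ranges come from the passed checks: `w_acc_…`), then the pops and `ret`.
Loop invariant: counter `i ≤ w`; bytes `< i` of the two records exchanged, bytes `≥ i` as at entry; the footprint (`hsame`); no
shadow byte written (`hun`); the eight stack slots (six saved registers, `b` at `[rsp₀ - 64]`, the return address); DF = 0.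
Measure `w - i`. The memory arithmetic of one round is `swap_step`. -/
theorem Vorbis.Spec.Worked.swap_bytes_ok : Vorbis.Spec.swap_bytes.Statement := by
  intro Lay hLay μ hμ u₀ hcode hload1 others frames u ret he hpre
  v_entry he
  obtain ⟨hsh, hliveA, hliveB, hdisj⟩ := hpre
  have hsp := hsh.rsp
  -- where the two records are: one arithmetic fact each
  have hwhereA : (u.reg .rdx).toNat = 0 ∨
      (0x119d40 ≤ (u.reg .rdi).toNat ∧ (u.reg .rdi).toNat + (u.reg .rdx).toNat ≤ 0xC00000 ∧
        ((u.reg .rsp).toNat + 8 ≤ (u.reg .rdi).toNat ∨ (u.reg .rdi).toNat + (u.reg .rdx).toNat ≤ 0x700000 ∨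
          0x800000 ≤ (u.reg .rdi).toNat)) := by
    by_cases hn : (u.reg .rdx).toNat = 0
    · exact Or.inl hn
    · exact Or.inr (hliveA.where_ hsh.inv hsh.offText (by omega))
  have hwhereB : (u.reg .rdx).toNat = 0 ∨
      (0x119d40 ≤ (u.reg .rsi).toNat ∧ (u.reg .rsi).toNat + (u.reg .rdx).toNat ≤ 0xC00000 ∧
        ((u.reg .rsp).toNat + 8 ≤ (u.reg .rsi).toNat ∨ (u.reg .rsi).toNat + (u.reg .rdx).toNat ≤ 0x700000 ∨
          0x800000 ≤ (u.reg .rsi).toNat)) := by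
    by_cases hn : (u.reg .rdx).toNat = 0
    · exact Or.inl hn
    · exact Or.inr (hliveB.where_ hsh.inv hsh.offText (by omega))
  u_walk hcode [hμ.vendor] until [Vorbis.L.swap_bytes.loop1] span [Vorbis.L.textLo, Vorbis.L.textHi] side (v_side)
  -- the loop head 0x101252
  obtain ⟨i, hi, hile, hdoneA, hdoneB, htodoA, htodoB⟩ : ∃ i : Nat, s_10121e.reg .rbx = UInt64.ofNat i ∧
      i ≤ (u.reg .rdx).toNat ∧
      (∀ j, j < i → s_10121e.mem.readLE (u.reg .rdi + UInt64.ofNat j) 1 = u.mem.readLE (u.reg .rsi + UInt64.ofNat j) 1) ∧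
      (∀ j, j < i → s_10121e.mem.readLE (u.reg .rsi + UInt64.ofNat j) 1 = u.mem.readLE (u.reg .rdi + UInt64.ofNat j) 1) ∧
      (∀ j, i ≤ j → j < (u.reg .rdx).toNat →
        s_10121e.mem.readLE (u.reg .rdi + UInt64.ofNat j) 1 = u.mem.readLE (u.reg .rdi + UInt64.ofNat j) 1) ∧
      (∀ j, i ≤ j → j < (u.reg .rdx).toNat →
        s_10121e.mem.readLE (u.reg .rsi + UInt64.ofNat j) 1 = u.mem.readLE (u.reg .rsi + UInt64.ofNat j) 1) := by
    refine ⟨0, w_rbx, Nat.zero_le _, fun j hj => absurd hj (Nat.not_lt_zero j),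
      fun j hj => absurd hj (Nat.not_lt_zero j), ?_, ?_⟩
    · intro j _ hj
      obtain ⟨hw1, hw2, hw3⟩ := hwhereA.resolve_left (by omega)
      have h0 : u.mem.readLE (u.reg .rdi + UInt64.ofNat j) 1 = u.mem.readLE (u.reg .rdi + UInt64.ofNat j) 1 := rfl
      u_frame h0
    · intro j _ hj
      obtain ⟨hw1, hw2, hw3⟩ := hwhereB.resolve_left (by omega)
      have h0 : u.mem.readLE (u.reg .rsi + UInt64.ofNat j) 1 = u.mem.readLE (u.reg .rsi + UInt64.ofNat j) 1 := rfl
      u_frame h0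
  have hsame : Mem.SameExcept [⟨(u.reg .rsp).toNat - 96, (u.reg .rsp).toNat⟩,
      ⟨(u.reg .rdi).toNat, (u.reg .rdi).toNat + (u.reg .rdx).toNat⟩,
      ⟨(u.reg .rsi).toNat, (u.reg .rsi).toNat + (u.reg .rdx).toNat⟩] u.mem s_10121e.mem := by
    u_same
  have hun : ShadowUntouched u.mem s_10121e.mem := by v_untouched
  have hs1 : UInt64.ofNat (s_10121e.mem.readLE (u.reg .rsp - 8) 8) = u.reg .r15 := by u_resolve
  have hs2 : UInt64.ofNat (s_10121e.mem.readLE (u.reg .rsp - 16) 8) = u.reg .r14 := by u_resolve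
  have hs3 : UInt64.ofNat (s_10121e.mem.readLE (u.reg .rsp - 24) 8) = u.reg .r13 := by u_resolve
  have hs4 : UInt64.ofNat (s_10121e.mem.readLE (u.reg .rsp - 32) 8) = u.reg .r12 := by u_resolve
  have hs5 : UInt64.ofNat (s_10121e.mem.readLE (u.reg .rsp - 40) 8) = u.reg .rbp := by u_resolve
  have hs6 : UInt64.ofNat (s_10121e.mem.readLE (u.reg .rsp - 48) 8) = u.reg .rbx := by u_resolve
  have hs7 : UInt64.ofNat (s_10121e.mem.readLE (u.reg .rsp - 64) 8) = u.reg .rsi := by u_resolve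
  have hs0 : UInt64.ofNat (s_10121e.mem.readLE (u.reg .rsp) 8) = ret := by u_resolve
  have hdf : s_10121e.flags .df = false := by
    rw [w_flags]
    simp only [X86.User.df_setStatus]
    exact he_df
  replace w_kept := w_kept.mono_all
    (S' := [.rbx, .r14, .r15, .rsp, .r12, .r13, .rbp, .rdi, .rax, .rdx]) (by rfl)
  clear w_mem w_flags w_rbx
  u_loop [i] (fun v => (u.reg .rdx).toNat - (v.reg .rbx).toNat)
  -- 0x101252 `cmp rbx, r14 ; jb`: into the body as far as the first check call (a stop made only to turn `hwhereA`, `hwhereB`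
  -- into plain arithmetic once `i < w` is known: every later `u_omega` is spared a case split), or out to the `ret`
  u_walk hcode [hμ.vendor] until [Vorbis.L.swap_bytes.loop1, Vorbis.L.swap_bytes.chk1] span [Vorbis.L.textLo, Vorbis.L.textHi] side (v_side)
  · -- 0x101227, inside the body: `i < w`, so the records are not empty
    have hilt : i < (u.reg .rdx).toNat := by u_omega
    obtain ⟨hwA1, hwA2, hwA3⟩ := hwhereA.resolve_left (by omega)
    obtain ⟨hwB1, hwB2, hwB3⟩ := hwhereB.resolve_left (by omega)
    clear hwhereA hwhereB
    u_walk hcode [hμ.vendor] until [Vorbis.L.swap_bytes.loop1] span [Vorbis.L.textLo, Vorbis.L.textHi] side (v_side)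
    · -- 0x101227, the check of the load `a[i]` (libc.c:62): the byte is inside the record at `a`
      have hun' : ShadowUntouched u.mem s_101227.mem := by v_untouched
      exact hliveA.accSmall hsh.inv hun' _ 1 (by decide) (by u_omega) (by u_omega)
    · -- 0x10123d, the check of the load `b[i]` (libc.c:63): the byte is inside the record at `b`
      have hun' : ShadowUntouched u.mem s_10123d.mem := by v_untouched
      exact hliveB.accSmall hsh.inv hun' _ 1 (by decide) (by u_omega) (by u_omega)
    · -- 0x10124e, the back edge (libc.c:61 `i++`)
      -- the two bytes stored are the two bytes loaded, which are the bytes of the entry memory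
      have hva : (BitVec.setWidth 8 (BitVec.zeroExtend 32
          (BitVec.ofNat 8 (s_10121e.mem.readLE (u.reg .rdi + UInt64.ofNat i) 1)))).toNat =
          u.mem.readLE (u.reg .rdi + UInt64.ofNat i) 1 := by
        have hlt := X86.User.Mem.readLE_lt s_10121e.mem (u.reg .rdi + UInt64.ofNat i) 1
        rw [Asan.byte_toNat _ (by omega)]
        exact htodoA i (Nat.le_refl i) hilt
      have hvb : (BitVec.setWidth 8 (BitVec.zeroExtend 32
          (BitVec.ofNat 8 (s_10121e.mem.readLE (u.reg .rsi + UInt64.ofNat i) 1)))).toNat =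
          u.mem.readLE (u.reg .rsi + UInt64.ofNat i) 1 := by
        have hlt := X86.User.Mem.readLE_lt s_10121e.mem (u.reg .rsi + UInt64.ofNat i) 1
        rw [Asan.byte_toNat _ (by omega)]
        exact htodoB i (Nat.le_refl i) hilt
      rw [hva, hvb] at w_mem
      -- the contents after this round: `swap_step`; the return address of the check calls went to the stack, off both records
      have hpa : (u.reg .rsp - 80).toNat + 8 ≤ (u.reg .rdi).toNat ∨
          (u.reg .rdi).toNat + (u.reg .rdx).toNat ≤ (u.reg .rsp - 80).toNat := by u_omega
      have hpb : (u.reg .rsp - 80).toNat + 8 ≤ (u.reg .rsi).toNat ∨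
          (u.reg .rsi).toNat + (u.reg .rdx).toNat ≤ (u.reg .rsp - 80).toNat := by u_omega
      have hp : (u.reg .rsp - 80).toNat + 8 < 2 ^ 64 := by u_omega
      obtain ⟨hdoneA', hdoneB', htodoA', htodoB'⟩ := Vorbis.Spec.swap_bytes.swap_step u.mem s_10121e.mem s_10124e.mem
        (u.reg .rdi) (u.reg .rsi) (u.reg .rsp - 80) (u.reg .rdx).toNat i _ w_mem hilt (by omega) (by omega) hp hdisj hpa hpb
        hdoneA hdoneB htodoA htodoB
      -- the two addresses of this round get names: the side conditions of the back edge (every stack slot is read through the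
      -- two byte stores) are then linear, without the `% 2^64` of `(a + i).toNat`
      have hpaN : (u.reg .rdi + UInt64.ofNat i).toNat = (u.reg .rdi).toNat + i := by u_omega
      have hpbN : (u.reg .rsi + UInt64.ofNat i).toNat = (u.reg .rsi).toNat + i := by u_omega
      generalize u.reg .rdi + UInt64.ofNat i = pa at *
      generalize u.reg .rsi + UInt64.ofNat i = pb at *
      -- (the four content clauses are found in the context: `hdoneA'` … `htodoB'`)
      u_loop_back [i + 1]
      · -- the counter
        rw [w_rbx, UInt64.ofNat_add]
        rfl
      · exact hilt
      · -- still no store to the shadow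
        v_untouched
      · -- the direction flag: the check kept it, the `add` wrote status flags only
        rw [w_flags]
        simp only [X86.User.df_setStatus]
        assumption
      · -- the measure
        rw [w_rbx]
        u_omega
  · -- the exit, walked to the `ret`: the contract's `Returned`
    refine ReachVia.done (Or.inl ?_)
    clear hs0 hs1 hs2 hs3 hs4 hs5 hs6 hs7
    v_returned
    -- the post: no shadow byte written; the two records exchanged (the loop ran to `i = w`)
    refine ⟨?_, ?_, ?_⟩
    · rw [w_mem]
      exact hun
    · intro j hj
      rw [w_mem]
      exact hdoneA j (by u_omega)
    · intro j hj
      rw [w_mem]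
      exact hdoneB j (by u_omega)
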